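-- pv_equiv track=rewrite | github.com/lurenxing628/---- | tools/collect_full_test_debt.py | _failed_report_texts
-- ===== SOURCE A (Python) =====
-- from typing import Any, Dict, Iterable, List, Optional, Sequence, Set
--
-- def _failed_report_texts(reports: Sequence[Dict[str, Any]], collection_errors: Sequence[Dict[str, Any]]) -> Dict[str, str]:
--     out: Dict[str, List[str]] = {}
--     for report in reports:
--         if report.get("outcome") != "failed":
--             continue
--         nodeid = str(report.get("nodeid") or "")
--         out.setdefault(nodeid, []).append(str(report.get("longrepr") or ""))
--     for error in collection_errors:
--         nodeid = str(error.get("nodeid") or "")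
--         out.setdefault(nodeid, []).append(str(error.get("longrepr") or ""))
--     return {nodeid: "\n".join(parts) for nodeid, parts in out.items()}
-- ===== SOURCE B (Python) =====
-- from typing import Any, Dict, Sequence
--
--
-- def _failed_report_texts(reports: Sequence[Dict[str, Any]], collection_errors: Sequence[Dict[str, Any]]) -> Dict[str, str]:
--     pairs = [(str(r.get("nodeid") or ""), str(r.get("longrepr") or ""))
--              for r in reports if r.get("outcome") == "failed"]
--     pairs.extend((str(e.get("nodeid") or ""), str(e.get("longrepr") or ""))
--                  for e in collection_errors)
--     keys = dict.fromkeys(n for n, _ in pairs)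
--     return {k: "\n".join(t for n, t in pairs if n == k) for k in keys}
-- ===== Notes on version B (the rewrite author's own statement) =====
-- stated objective: alternative
-- what changed: Replaces the dict-of-lists bucketing (setdefault+append per report) by building one flat (nodeid, text) pair list, deduplicating the keys in first-occurrence order, and joining each key's texts by a per-key filter over the flat list.
import Mathlib
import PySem

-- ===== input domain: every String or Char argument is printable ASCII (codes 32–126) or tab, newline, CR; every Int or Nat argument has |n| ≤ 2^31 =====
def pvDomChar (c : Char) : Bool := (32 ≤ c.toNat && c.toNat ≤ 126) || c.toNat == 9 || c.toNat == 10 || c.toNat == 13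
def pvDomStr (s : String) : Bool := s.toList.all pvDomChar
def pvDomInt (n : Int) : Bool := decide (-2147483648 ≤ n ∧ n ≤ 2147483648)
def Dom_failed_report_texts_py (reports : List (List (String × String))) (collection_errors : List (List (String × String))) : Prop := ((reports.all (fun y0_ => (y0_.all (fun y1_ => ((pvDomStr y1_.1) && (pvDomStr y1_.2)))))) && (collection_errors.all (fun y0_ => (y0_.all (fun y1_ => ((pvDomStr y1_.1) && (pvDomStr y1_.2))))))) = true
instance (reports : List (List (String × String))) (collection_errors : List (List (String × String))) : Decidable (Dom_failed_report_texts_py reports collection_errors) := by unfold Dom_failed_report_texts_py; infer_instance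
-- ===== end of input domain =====

-- B replaces A's dict-of-lists bucketing by a flat (nodeid, text) pair list, an ordered key
-- dedup, and a per-key filter+join — an alternative decomposition of the same grouping.

-- shared extraction helpers: the identical Python expressions appear in both A and B.
-- r.get(k) — first match in the association list
def pvGet (r : List (String × String)) (k : String) : Option String :=
  (PySem.Dict.mk r).get? k

-- str(r.get("nodeid") or "") : None → "", "" → "", s → s, i.e. getD "" (values are strings)
def pvNode (r : List (String × String)) : String := (pvGet r "nodeid").getD ""

-- str(r.get("longrepr") or "")
def pvText (r : List (String × String)) : String := (pvGet r "longrepr").getD ""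

-- r.get("outcome") == "failed"
def pvFailed (r : List (String × String)) : Bool := pvGet r "outcome" == some "failed"

-- ===== PORT A =====
-- out.setdefault(nodeid, []).append(t) is out[nodeid] = out.get(nodeid, []) + [t] = Dict.modify
-- the dict after A's two loops (first the failed reports, then the collection errors)
def pvOutA (reports : List (List (String × String))) (collection_errors : List (List (String × String))) : PySem.Dict String (List String) :=
  collection_errors.foldl (fun d e => d.modify (pvNode e) [] (· ++ [pvText e]))
    (reports.foldl (fun d r =>
      if pvFailed r = false then d
      else d.modify (pvNode r) [] (· ++ [pvText r])) PySem.Dict.empty)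

def failed_report_texts_py (reports : List (List (String × String))) (collection_errors : List (List (String × String))) : List (String × String) :=
  (pvOutA reports collection_errors).items.map (fun p => (p.1, PySem.Str.join "\n" p.2))

-- ===== PORT B =====
-- B's flat pair list: failed reports first, then collection errors
def pvPairs (reports : List (List (String × String))) (collection_errors : List (List (String × String))) : List (String × String) :=
  (reports.filter (fun r => pvFailed r)).map (fun r => (pvNode r, pvText r))
    ++ collection_errors.map (fun e => (pvNode e, pvText e))

def failed_report_texts_py_alt (reports : List (List (String × String))) (collection_errors : List (List (String × String))) : List (String × String) :=
  (PySem.List.dedup ((pvPairs reports collection_errors).map Prod.fst)).map   -- dict.fromkeys: first occurrences, in order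
    (fun k => (k, PySem.Str.join "\n"
      (((pvPairs reports collection_errors).filter (fun p => p.1 == k)).map Prod.snd)))

-- ===== PRECONDITION & SPEC =====
def Spec_failed_report_texts_py (reports : List (List (String × String))) (collection_errors : List (List (String × String))) (out : List (String × String)) : Prop := out = failed_report_texts_py_alt reports collection_errors
instance (reports : List (List (String × String))) (collection_errors : List (List (String × String))) (out : List (String × String)) : Decidable (Spec_failed_report_texts_py reports collection_errors out) := by unfold Spec_failed_report_texts_py; infer_instance

-- ===== CLAIM (what is proved, stated in full; the proofs are below) =====
def Claim_equal_failed_report_texts_py : Prop := ∀ (reports : List (List (String × String))) (collection_errors : List (List (String × String))), Dom_failed_report_texts_py reports collection_errors → Spec_failed_report_texts_py reports collection_errors (failed_report_texts_py reports collection_errors)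

-- ===== LEMMAS AND PROOFS =====

-- A's two loops build exactly the fold of the grouping step over B's flat pair list.
theorem pv_dict_eq (reports collection_errors : List (List (String × String))) :
    pvOutA reports collection_errors
    = (pvPairs reports collection_errors).foldl
        (fun d p => d.modify p.1 [] (· ++ [p.2])) PySem.Dict.empty := by
  unfold pvOutA pvPairs
  rw [List.foldl_append, List.foldl_map, List.foldl_map]
  congr 1
  have hfun : (fun (d : PySem.Dict String (List String)) r =>
      if pvFailed r = false then d else d.modify (pvNode r) [] (· ++ [pvText r]))
      = fun d r => if pvFailed r then d.modify (pvNode r) [] (· ++ [pvText r]) else d := by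
    funext d r
    by_cases h : pvFailed r = true <;> simp [h]
  rw [hfun, PySem.List.foldl_if_eq_foldl_filter]

-- items of the grouping fold: keys in first-occurrence order, each paired with its filtered texts
theorem pv_items_group (pairs : List (String × String)) :
    ((pairs.foldl (fun d p => d.modify p.1 [] (· ++ [p.2]))
        (PySem.Dict.empty : PySem.Dict String (List String))).items)
    = (PySem.List.dedup (pairs.map Prod.fst)).map
        (fun k => (k, (pairs.filter (fun p => p.1 == k)).map Prod.snd)) := by
  have hnd : (pairs.foldl (fun d p => d.modify p.1 [] (· ++ [p.2]))
      (PySem.Dict.empty : PySem.Dict String (List String))).keys.Nodup := by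
    exact PySem.Dict.nodup_keys_foldl_modify_key pairs Prod.fst [] (fun _ p v => v ++ [p.2])
      PySem.Dict.empty PySem.Dict.nodup_keys_empty
  rw [PySem.Dict.items_eq_map_keys _ hnd []]
  have hkeys : (pairs.foldl (fun d p => d.modify p.1 [] (· ++ [p.2]))
      (PySem.Dict.empty : PySem.Dict String (List String))).keys
      = PySem.List.dedup (pairs.map Prod.fst) := by
    rw [PySem.Dict.keys_foldl_modify_key pairs Prod.fst [] (fun _ p v => v ++ [p.2])]
    simp [PySem.Dict.keys_empty, PySem.Set.update_nil_left]
  rw [hkeys]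
  apply List.map_congr_left
  intro k _
  have hv := PySem.Dict.getD_foldl_modify_append pairs
      (PySem.Dict.empty : PySem.Dict String (List String)) k
  simp only [PySem.Dict.getD_empty, List.nil_append] at hv
  simp [hv]

-- ===== VERDICT (by name: the statement is the Claim_ definition above) =====
theorem failed_report_texts_py_spec : Claim_equal_failed_report_texts_py := by
  intro reports collection_errors _
  unfold Spec_failed_report_texts_py failed_report_texts_py failed_report_texts_py_alt
  rw [pv_dict_eq, pv_items_group, List.map_map]
  rfl
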